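-- pv_equiv track=rewrite | github.com/fangarm8/Study | Contest/test3.py | find_password
-- ===== SOURCE A (Python) =====
-- def find_password(sequence, required_chars, max_len):
--     if max_len > len(sequence):
--         return "-1"
--
--     char_set = set(required_chars)
--     char_set_cpy = char_set.copy()
--
--     for i in range(len(sequence) - max_len, -1, -1):
--         substring = sequence[i:i + max_len]
--         valid = True
--         for c in substring:
--             if c in char_set_cpy:
--                 char_set_cpy.remove(c)
--             if c not in char_set:
--                 valid = False
--                 break
--
--         if char_set_cpy:
--             valid = False
--         if valid:
--             return substring
--         char_set_cpy = char_set.copy()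
--
--     return "-1"
-- ===== SOURCE B (Python) =====
-- def find_password(sequence, required_chars, max_len):
--     n = len(sequence)
--     if max_len > n or max_len < 0:
--         return "-1"
--     req = set(required_chars)
--     i = n - max_len
--     window = sequence[i:]
--     # counts of the required chars in the rightmost window, done with C-level str.count
--     cnt = {c: window.count(c) for c in req}
--     bad = max_len - sum(window.count(c) for c in req)   # window chars that are not required
--     distinct = sum(1 for c in req if c in window)       # required chars present in the window
--     while True:
--         if bad == 0 and distinct == len(req):
--             return sequence[i:i + max_len]
--         if i == 0:
--             return "-1"
--         i -= 1
--         c = sequence[i]                 # enters on the left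
--         if c in req:
--             cnt[c] = cnt.get(c, 0) + 1
--             if cnt[c] == 1:
--                 distinct += 1
--         else:
--             bad += 1
--         c = sequence[i + max_len]       # leaves on the right
--         if c in req:
--             cnt[c] = cnt.get(c, 0) - 1
--             if cnt[c] == 0:
--                 distinct -= 1
--         else:
--             bad -= 1
-- ===== Notes on version B (the rewrite author's own statement) =====
-- stated objective: faster
-- what changed: Replaces A's per-window rescan (slice each window and re-check it against a fresh copy of the required set) by a single fixed-size sliding window scanned right-to-left that maintains character counts, a count of non-required characters and the number of required characters present, so each window is tested in O(1).
-- outside the precondition, e.g. on find_password('ab', 'a', -1): A returns 'a', B returns '-1'; on find_password('a', '', -1): A returns '', B returns '-1'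
import Mathlib
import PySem

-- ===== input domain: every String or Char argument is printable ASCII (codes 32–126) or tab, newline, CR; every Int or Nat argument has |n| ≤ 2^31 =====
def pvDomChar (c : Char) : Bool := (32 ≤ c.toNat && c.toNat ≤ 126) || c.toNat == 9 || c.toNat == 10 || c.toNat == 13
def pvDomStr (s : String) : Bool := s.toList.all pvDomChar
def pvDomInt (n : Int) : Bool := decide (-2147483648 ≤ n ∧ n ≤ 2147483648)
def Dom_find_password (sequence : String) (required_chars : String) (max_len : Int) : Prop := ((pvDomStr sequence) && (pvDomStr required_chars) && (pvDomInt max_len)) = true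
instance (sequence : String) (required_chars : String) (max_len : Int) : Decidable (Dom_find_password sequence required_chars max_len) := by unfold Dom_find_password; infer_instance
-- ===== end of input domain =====

-- B replaces A's per-window rescan by one right-to-left sliding window with character counts
-- (O(n) instead of O(n*max_len)); return values agree on 0 ≤ max_len.

-- ===== PORT A =====
-- inner 'for c in substring' loop: removes seen chars from the copy, breaks on a non-required char
def pvInnerA (char_set : PySem.Set Char) : List Char → PySem.Set Char → PySem.Set Char × Bool
  | [], cpy => (cpy, true)
  | c :: rest, cpy =>
    let cpy' := if PySem.Set.contains cpy c then PySem.Set.discard cpy c else cpy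
    if !(PySem.Set.contains char_set c) then (cpy', false)
    else pvInnerA char_set rest cpy'

-- outer 'for i in range(len(sequence) - max_len, -1, -1)' loop with early return
def pvOuterA (l : List Char) (char_set : PySem.Set Char) (max_len : Int) : List Int → String
  | [] => "-1"
  | i :: rest =>
    let substring := PySem.List.slice l (some i) (some (i + max_len))
    let r := pvInnerA char_set substring char_set
    if r.2 && r.1.isEmpty then String.ofList substring
    else pvOuterA l char_set max_len rest

def find_password (sequence : String) (required_chars : String) (max_len : Int) : String :=
  let l := sequence.toList
  if max_len > (l.length : Int) then "-1"
  else
    let char_set := PySem.Set.ofList required_chars.toList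
    pvOuterA l char_set max_len (PySem.List.pyRange ((l.length : Int) - max_len) (-1) (-1))

-- ===== PORT B =====
-- a char enters the window: cnt[c] = cnt.get(c, 0) + 1 / distinct / bad bookkeeping
def pvStepAdd (req : PySem.Set Char) (st : PySem.Dict Char Int × Int × Int) (c : Char) :
    PySem.Dict Char Int × Int × Int :=
  if PySem.Set.contains req c then
    (st.1.insert c (st.1.getD c 0 + 1), st.2.1,
      if st.1.getD c 0 + 1 = 1 then st.2.2 + 1 else st.2.2)
  else (st.1, st.2.1 + 1, st.2.2)

-- a char leaves the window: cnt[c] = cnt.get(c, 0) - 1 / distinct / bad bookkeeping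
def pvStepDel (req : PySem.Set Char) (st : PySem.Dict Char Int × Int × Int) (c : Char) :
    PySem.Dict Char Int × Int × Int :=
  if PySem.Set.contains req c then
    (st.1.insert c (st.1.getD c 0 - 1), st.2.1,
      if st.1.getD c 0 - 1 = 0 then st.2.2 - 1 else st.2.2)
  else (st.1, st.2.1 - 1, st.2.2)

-- the 'while True' loop, i counting down; indices are always in range (getD default unused)
def pvLoopB (l : List Char) (req : PySem.Set Char) (k : Nat) :
    Nat → PySem.Dict Char Int → Int → Int → String
  | i, cnt, bad, distinct =>
    if bad = 0 ∧ distinct = PySem.Set.len req then String.ofList ((l.drop i).take k)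
    else
      match i with
      | 0 => "-1"
      | i' + 1 =>
        let st1 := pvStepAdd req (cnt, bad, distinct) (l.getD i' 'a')
        let st2 := pvStepDel req st1 (l.getD (i' + k) 'a')
        pvLoopB l req k i' st2.1 st2.2.1 st2.2.2

def find_password_alt (sequence : String) (required_chars : String) (max_len : Int) : String :=
  let l := sequence.toList
  if max_len > (l.length : Int) ∨ max_len < 0 then "-1"
  else
    let k := max_len.toNat
    let req := PySem.Set.ofList required_chars.toList
    -- window = sequence[n - max_len:]; 0 ≤ n - k ≤ n here, so drop is the exact slice
    let w := l.drop (l.length - k)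
    -- cnt = {c: window.count(c) for c in req}; window.count(c) is PySem.Chars.count w [c]
    let cnt := req.foldl (fun d c => d.insert c (PySem.Chars.count w [c] : Int)) PySem.Dict.empty
    -- bad = max_len - sum(window.count(c) for c in req)
    let bad : Int := max_len - (req.map (fun c => (PySem.Chars.count w [c] : Int))).sum
    -- distinct = sum(1 for c in req if c in window); 'c in window' is PySem.Chars.isIn [c] w
    let distinct : Int := req.foldl (fun acc c => if PySem.Chars.isIn [c] w then acc + 1 else acc) 0
    pvLoopB l req k (l.length - k) cnt bad distinct

-- ===== PRECONDITION & SPEC =====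
-- Pre_ excludes negative max_len, on which A's windows sequence[i:i+max_len] are Python
-- negative-slicing accidents (e.g. A('ab','a',-1) = 'a'); B's natural answer there is '-1'.
def Pre_find_password (sequence : String) (required_chars : String) (max_len : Int) : Prop :=
  0 ≤ max_len
instance (sequence : String) (required_chars : String) (max_len : Int) :
    Decidable (Pre_find_password sequence required_chars max_len) := by
  unfold Pre_find_password; infer_instance
def pvWitness_find_password : String × String × Int := ("cabcab", "ab", 2)
def Spec_find_password (sequence : String) (required_chars : String) (max_len : Int) (out : String) : Prop := out = find_password_alt sequence required_chars max_len
instance (sequence : String) (required_chars : String) (max_len : Int) (out : String) : Decidable (Spec_find_password sequence required_chars max_len out) := by unfold Spec_find_password; infer_instance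

-- ===== CLAIM (what is proved, stated in full; the proofs are below) =====
def Claim_equal_find_password : Prop := ∀ (sequence : String) (required_chars : String) (max_len : Int), Dom_find_password sequence required_chars max_len → Pre_find_password sequence required_chars max_len → Spec_find_password sequence required_chars max_len (find_password sequence required_chars max_len)

-- ===== LEMMAS AND PROOFS =====

-- the loop state describes (the content of) the window w
def pvDesc (req : PySem.Set Char) (w : List Char) (st : PySem.Dict Char Int × Int × Int) : Prop :=
  (∀ c, c ∈ req → st.1.getD c 0 = (w.count c : Int)) ∧
  st.2.1 = ((w.countP (fun x => decide (x ∉ req))) : Int) ∧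
  st.2.2 = (((req.filter (fun x => decide (x ∈ w))).length) : Int)

lemma pvDesc_perm (req : PySem.Set Char) (w w' : List Char)
    (st : PySem.Dict Char Int × Int × Int) (hp : w.Perm w') (h : pvDesc req w st) :
    pvDesc req w' st := by
  obtain ⟨h1, h2, h3⟩ := h
  refine ⟨?_, ?_, ?_⟩
  · intro c hc; rw [h1 c hc, hp.count_eq]
  · rw [h2, hp.countP_eq]
  · rw [h3]
    have : req.filter (fun x => decide (x ∈ w)) = req.filter (fun x => decide (x ∈ w')) :=
      List.filter_congr (fun x _ => by simp [hp.mem_iff])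
    rw [this]

lemma pvFilter_append (req : List Char) (hnd : req.Nodup) (w : List Char) (c : Char) :
    (req.filter (fun x => decide (x ∈ w ++ [c]))).length
      = (req.filter (fun x => decide (x ∈ w))).length
        + (if c ∈ req ∧ c ∉ w then 1 else 0) := by
  induction req with
  | nil => simp
  | cons r t ih =>
    have hrt : r ∉ t := (List.nodup_cons.mp hnd).1
    have hnt : t.Nodup := (List.nodup_cons.mp hnd).2
    by_cases h2 : r ∈ w
    · have h1 : r ∈ w ++ [c] := List.mem_append_left _ h2
      rw [List.filter_cons, List.filter_cons, if_pos (decide_eq_true h1),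
        if_pos (decide_eq_true h2), List.length_cons, List.length_cons, ih hnt]
      have heq : (c ∈ r :: t ∧ c ∉ w) ↔ (c ∈ t ∧ c ∉ w) := by
        constructor
        · rintro ⟨hm, hw⟩
          rcases List.mem_cons.mp hm with h | h
          · exact absurd (h ▸ h2) hw
          · exact ⟨h, hw⟩
        · rintro ⟨hm, hw⟩
          exact ⟨List.mem_cons_of_mem _ hm, hw⟩
      rw [if_congr heq rfl rfl]
      omega
    · by_cases hrc : r = c
      · subst hrc
        have h1 : r ∈ w ++ [r] := by simp
        rw [List.filter_cons, List.filter_cons, if_pos (decide_eq_true h1),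
          if_neg (by simp [h2]), List.length_cons, ih hnt]
        rw [if_neg (fun hh => hrt hh.1), if_pos ⟨List.mem_cons_self .., h2⟩]
      · have h1 : r ∉ w ++ [c] := by simp [h2, hrc]
        rw [List.filter_cons, List.filter_cons, if_neg (by simp [h1]),
          if_neg (by simp [h2]), ih hnt]
        have heq : (c ∈ r :: t ∧ c ∉ w) ↔ (c ∈ t ∧ c ∉ w) := by
          constructor
          · rintro ⟨hm, hw⟩
            rcases List.mem_cons.mp hm with h | h
            · exact absurd h.symm hrc
            · exact ⟨h, hw⟩
          · rintro ⟨hm, hw⟩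
            exact ⟨List.mem_cons_of_mem _ hm, hw⟩
        rw [if_congr heq rfl rfl]

lemma pvStepAdd_desc (req : PySem.Set Char) (hnd : req.Nodup) (w : List Char)
    (st : PySem.Dict Char Int × Int × Int) (c : Char) (h : pvDesc req w st) :
    pvDesc req (w ++ [c]) (pvStepAdd req st c) := by
  obtain ⟨h1, h2, h3⟩ := h
  unfold pvStepAdd
  by_cases hc : PySem.Set.contains req c
  · have hcm : c ∈ req := (PySem.Set.contains_iff _ _).mp hc
    rw [if_pos hc]
    refine ⟨?_, ?_, ?_⟩
    · intro x hx
      rw [PySem.Dict.getD_insert]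
      by_cases hxc : x = c
      · subst hxc
        have hcnt : List.count x (w ++ [x]) = List.count x w + 1 := by simp
        rw [if_pos rfl, h1 x hx, hcnt]
        push_cast
        ring
      · have hcx : ¬ c = x := fun hh => hxc hh.symm
        have hcnt : List.count x (w ++ [c]) = List.count x w := by
          simp [hcx]
        rw [if_neg hxc, h1 x hx, hcnt]
    · have hone : List.countP (fun x => decide (x ∉ req)) [c] = 0 := by simp [hcm]
      rw [h2, List.countP_append, hone]
      simp
    · rw [pvFilter_append req hnd w c]
      by_cases hcw : c ∈ w
      · have hv : ¬ (st.1.getD c 0 + 1 = 1) := by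
          rw [h1 c hcm]
          have : 0 < w.count c := List.count_pos_iff.mpr hcw
          omega
        have hif : (if c ∈ req ∧ c ∉ w then 1 else 0) = 0 := by simp [hcw]
        rw [hif, if_neg hv, h3]
        simp
      · have hv : st.1.getD c 0 + 1 = 1 := by
          rw [h1 c hcm, List.count_eq_zero.mpr hcw]
          rfl
        have hif : (if c ∈ req ∧ c ∉ w then 1 else 0) = 1 := by simp [hcm, hcw]
        rw [hif, if_pos hv, h3]
        push_cast
        ring
  · have hcm : c ∉ req := fun hm => hc ((PySem.Set.contains_iff _ _).mpr hm)
    rw [if_neg hc]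
    refine ⟨?_, ?_, ?_⟩
    · intro x hx
      have hcx : ¬ c = x := fun hh => hcm (hh ▸ hx)
      have hcnt : List.count x (w ++ [c]) = List.count x w := by
        simp [hcx]
      rw [h1 x hx, hcnt]
    · have hone : List.countP (fun x => decide (x ∉ req)) [c] = 1 := by simp [hcm]
      rw [h2, List.countP_append, hone]
      push_cast
      ring
    · have hif : (if c ∈ req ∧ c ∉ w then 1 else 0) = 0 := by simp [hcm]
      rw [h3, pvFilter_append req hnd w c, hif]
      simp

lemma pvStepDel_desc (req : PySem.Set Char) (hnd : req.Nodup) (w : List Char)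
    (st : PySem.Dict Char Int × Int × Int) (c : Char) (h : pvDesc req (w ++ [c]) st) :
    pvDesc req w (pvStepDel req st c) := by
  obtain ⟨h1, h2, h3⟩ := h
  unfold pvStepDel
  by_cases hc : PySem.Set.contains req c
  · have hcm : c ∈ req := (PySem.Set.contains_iff _ _).mp hc
    rw [if_pos hc]
    have hgd : st.1.getD c 0 = (w.count c : Int) + 1 := by
      have hcnt : List.count c (w ++ [c]) = List.count c w + 1 := by simp
      rw [h1 c hcm, hcnt]
      push_cast
      ring
    refine ⟨?_, ?_, ?_⟩
    · intro x hx
      rw [PySem.Dict.getD_insert]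
      by_cases hxc : x = c
      · subst hxc
        rw [if_pos rfl, hgd]
        ring
      · have hcx : ¬ c = x := fun hh => hxc hh.symm
        have hcnt : List.count x (w ++ [c]) = List.count x w := by
          simp [hcx]
        rw [if_neg hxc, h1 x hx, hcnt]
    · have hone : List.countP (fun x => decide (x ∉ req)) [c] = 0 := by simp [hcm]
      rw [h2, List.countP_append, hone]
      simp
    · rw [h3, pvFilter_append req hnd w c]
      by_cases hcw : c ∈ w
      · have hv : ¬ (st.1.getD c 0 - 1 = 0) := by
          rw [hgd]
          have : 0 < w.count c := List.count_pos_iff.mpr hcw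
          omega
        have hif : (if c ∈ req ∧ c ∉ w then 1 else 0) = 0 := by simp [hcw]
        rw [hif, if_neg hv]
        simp
      · have hv : st.1.getD c 0 - 1 = 0 := by
          rw [hgd, List.count_eq_zero.mpr hcw]
          rfl
        have hif : (if c ∈ req ∧ c ∉ w then 1 else 0) = 1 := by simp [hcm, hcw]
        rw [hif, if_pos hv]
        push_cast
        ring
  · have hcm : c ∉ req := fun hm => hc ((PySem.Set.contains_iff _ _).mpr hm)
    rw [if_neg hc]
    refine ⟨?_, ?_, ?_⟩
    · intro x hx
      have hcx : ¬ c = x := fun hh => hcm (hh ▸ hx)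
      have hcnt : List.count x (w ++ [c]) = List.count x w := by
        simp [hcx]
      rw [h1 x hx, hcnt]
    · have hone : List.countP (fun x => decide (x ∉ req)) [c] = 1 := by simp [hcm]
      rw [h2, List.countP_append, hone]
      push_cast
      ring
    · have hif : (if c ∈ req ∧ c ∉ w then 1 else 0) = 0 := by simp [hcm]
      rw [h3, pvFilter_append req hnd w c, hif]
      simp

lemma pvInnerA_valid (cs : PySem.Set Char) (w : List Char) (cpy : PySem.Set Char) :
    (pvInnerA cs w cpy).2 = true ↔ ∀ c ∈ w, c ∈ cs := by
  induction w generalizing cpy with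
  | nil => simp [pvInnerA]
  | cons c rest ih =>
    by_cases hc : PySem.Set.contains cs c
    · have hcm : c ∈ cs := (PySem.Set.contains_iff _ _).mp hc
      simp only [pvInnerA, hc, Bool.not_true, Bool.false_eq_true, if_false, ih]
      simp [hcm]
    · have hcm : c ∉ cs := fun h => hc ((PySem.Set.contains_iff _ _).mpr h)
      simp only [pvInnerA, hc, Bool.not_false, if_true]
      simp [hcm]

lemma pvInnerA_mem (cs : PySem.Set Char) (w : List Char) (cpy : PySem.Set Char)
    (h : ∀ c ∈ w, c ∈ cs) (y : Char) :
    y ∈ (pvInnerA cs w cpy).1 ↔ y ∈ cpy ∧ y ∉ w := by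
  induction w generalizing cpy with
  | nil => simp [pvInnerA]
  | cons c rest ih =>
    have hcm : c ∈ cs := h c (List.mem_cons_self ..)
    have hrest : ∀ x ∈ rest, x ∈ cs := fun x hx => h x (List.mem_cons_of_mem _ hx)
    have hc : PySem.Set.contains cs c := (PySem.Set.contains_iff _ _).mpr hcm
    simp only [pvInnerA, hc, Bool.not_true, Bool.false_eq_true, if_false, ih _ hrest]
    by_cases hcc : PySem.Set.contains cpy c
    · rw [if_pos hcc]
      simp [PySem.Set.mem_discard, List.mem_cons]
      tauto
    · have hccm : c ∉ cpy := fun hm => hcc ((PySem.Set.contains_iff _ _).mpr hm)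
      rw [if_neg hcc]
      simp only [List.mem_cons]
      constructor
      · rintro ⟨hy, hr⟩
        exact ⟨hy, by rintro (rfl | hh); exact hccm hy; exact hr hh⟩
      · rintro ⟨hy, hr⟩
        exact ⟨hy, fun hh => hr (Or.inr hh)⟩

-- A's per-window test and B's O(1) test both say: window content = required set
lemma pvAcheck_iff (req : PySem.Set Char) (w : List Char) :
    ((pvInnerA req w req).2 && (pvInnerA req w req).1.isEmpty) = true
      ↔ ((∀ c ∈ w, c ∈ req) ∧ ∀ c ∈ req, c ∈ w) := by
  rw [Bool.and_eq_true, pvInnerA_valid]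
  constructor
  · rintro ⟨hall, hemp⟩
    refine ⟨hall, fun y hy => ?_⟩
    by_contra hyw
    have : y ∈ (pvInnerA req w req).1 := (pvInnerA_mem req w req hall y).mpr ⟨hy, hyw⟩
    rw [List.isEmpty_iff.mp hemp] at this
    simp at this
  · rintro ⟨hall, hsub⟩
    refine ⟨hall, List.isEmpty_iff.mpr (List.eq_nil_iff_forall_not_mem.mpr fun y hy => ?_)⟩
    obtain ⟨hy1, hy2⟩ := (pvInnerA_mem req w req hall y).mp hy
    exact hy2 (hsub y hy1)

lemma pvBcheck_iff (req : PySem.Set Char) (w : List Char)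
    (st : PySem.Dict Char Int × Int × Int) (hd : pvDesc req w st) :
    (st.2.1 = 0 ∧ st.2.2 = PySem.Set.len req)
      ↔ ((∀ c ∈ w, c ∈ req) ∧ ∀ c ∈ req, c ∈ w) := by
  obtain ⟨h1, h2, h3⟩ := hd
  rw [h2, h3]
  constructor
  · rintro ⟨hb, hdd⟩
    constructor
    · intro c hc
      have : w.countP (fun x => decide (x ∉ req)) = 0 := by exact_mod_cast hb
      have := List.countP_eq_zero.mp this c hc
      simpa using this
    · intro c hc
      have hlen : (req.filter (fun x => decide (x ∈ w))).length = req.length := by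
        have : PySem.Set.len req = ((req.length : Nat) : Int) := by
          simp [PySem.Set.len]
        rw [this] at hdd
        exact_mod_cast hdd
      have := List.length_filter_eq_length_iff.mp hlen c hc
      simpa using this
  · rintro ⟨hall, hsub⟩
    constructor
    · have : w.countP (fun x => decide (x ∉ req)) = 0 :=
        List.countP_eq_zero.mpr (fun c hc => by simp [hall c hc])
      exact_mod_cast this
    · have hlen : (req.filter (fun x => decide (x ∈ w))).length = req.length :=
        List.length_filter_eq_length_iff.mpr (fun c hc => by simp [hsub c hc])
      have : PySem.Set.len req = ((req.length : Nat) : Int) := by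
        simp [PySem.Set.len]
      rw [this]
      exact_mod_cast hlen

lemma pvWin_shift (l : List Char) (K i' : Nat) (h : i' + 1 + K ≤ l.length) :
    l[i']'(by omega) :: ((l.drop (i' + 1)).take K)
      = ((l.drop i').take K) ++ [l[i' + K]'(by omega)] := by
  have hlen : i' < l.length := by omega
  have hd : l.drop i' = l[i'] :: l.drop (i' + 1) := List.drop_eq_getElem_cons hlen
  have h1 : (l.drop i').take (K + 1) = l[i']'hlen :: (l.drop (i' + 1)).take K := by
    rw [hd, List.take_succ_cons]
  have h2 : (l.drop i').take (K + 1) = (l.drop i').take K ++ [l[i' + K]'(by omega)] := by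
    rw [List.take_add_one, List.getElem?_drop, List.getElem?_eq_getElem (by omega : i' + K < l.length)]
    rfl
  rw [← h1, h2]

lemma pvCountGo (c : Char) (l : List Char) :
    ∀ (fuel acc : Nat), l.length ≤ fuel →
      PySem.Chars.count.go [c] fuel l acc = acc + l.count c := by
  induction l with
  | nil =>
    intro fuel acc _
    cases fuel <;> simp [PySem.Chars.count.go]
  | cons x t ih =>
    intro fuel acc h
    match fuel with
    | fuel' + 1 =>
      have hle : t.length ≤ fuel' := by
        simp only [List.length_cons] at h
        omega
      by_cases hx : c = x
      · subst hx
        simp [PySem.Chars.count.go, List.isPrefixOf, ih fuel' (acc + 1) hle]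
        omega
      · have hxc : ¬ x = c := fun hh => hx hh.symm
        simp [PySem.Chars.count.go, List.isPrefixOf, hx, hxc, ih fuel' acc hle]

lemma pvCount_single (w : List Char) (c : Char) : PySem.Chars.count w [c] = w.count c := by
  have h0 : ([c] : List Char).isEmpty = false := rfl
  simp only [PySem.Chars.count, h0, Bool.false_eq_true, if_false]
  rw [pvCountGo c w w.length 0 le_rfl]
  omega

lemma pvInfix_single (c : Char) (w : List Char) : [c] <:+: w ↔ c ∈ w := by
  constructor
  · intro h
    exact h.subset (List.mem_singleton_self c)
  · intro h
    obtain ⟨s, t, rfl⟩ := List.append_of_mem h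
    exact ⟨s, t, by simp⟩

lemma pvGetD_fold_notmem (f : Char → Int) :
    ∀ (rs : List Char) (d : PySem.Dict Char Int) (x : Char), x ∉ rs →
      (rs.foldl (fun d c => d.insert c (f c)) d).getD x 0 = d.getD x 0 := by
  intro rs
  induction rs with
  | nil => intro d x _; rfl
  | cons r t ih =>
    intro d x hx
    have hxr : x ≠ r := fun hh => hx (hh ▸ List.mem_cons_self ..)
    have hxt : x ∉ t := fun hh => hx (List.mem_cons_of_mem _ hh)
    simp only [List.foldl_cons]
    rw [ih _ x hxt, PySem.Dict.getD_insert, if_neg hxr]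

lemma pvGetD_fold (f : Char → Int) :
    ∀ (rs : List Char) (d : PySem.Dict Char Int) (x : Char), x ∈ rs →
      (rs.foldl (fun d c => d.insert c (f c)) d).getD x 0 = f x := by
  intro rs
  induction rs with
  | nil => intro d x hx; cases hx
  | cons r t ih =>
    intro d x hx
    simp only [List.foldl_cons]
    by_cases hxt : x ∈ t
    · exact ih _ x hxt
    · have hxr : x = r := by
        rcases List.mem_cons.mp hx with hh | hh
        · exact hh
        · exact absurd hh hxt
      subst hxr
      rw [pvGetD_fold_notmem f t _ x hxt, PySem.Dict.getD_insert, if_pos rfl]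

lemma pvCountP_cons_mem (w : List Char) (r : Char) (t : List Char) (hrt : r ∉ t) :
    w.countP (fun x => decide (x ∈ r :: t))
      = w.count r + w.countP (fun x => decide (x ∈ t)) := by
  induction w with
  | nil => simp
  | cons y ys ih =>
    rw [List.countP_cons, List.countP_cons, List.count_cons, ih]
    by_cases hyr : y = r
    · subst hyr
      simp [hrt]
      omega
    · by_cases hyt : y ∈ t
      · simp [hyr, hyt, List.mem_cons]
        omega
      · have hm : ¬ y ∈ r :: t := by
          simp [List.mem_cons, hyr, hyt]
        simp [hm, hyt, hyr]

lemma pvSum_counts (w : List Char) :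
    ∀ (rs : List Char), rs.Nodup →
      (rs.map (fun c => w.count c)).sum = w.countP (fun x => decide (x ∈ rs)) := by
  intro rs
  induction rs with
  | nil => simp
  | cons r t ih =>
    intro hnd
    have hrt : r ∉ t := (List.nodup_cons.mp hnd).1
    have hnt : t.Nodup := (List.nodup_cons.mp hnd).2
    rw [List.map_cons, List.sum_cons, ih hnt, pvCountP_cons_mem w r t hrt]

lemma pvSumCast (rs : List Char) (f : Char → Nat) :
    (rs.map (fun c => (f c : Int))).sum = ((rs.map f).sum : Int) := by
  induction rs with
  | nil => simp
  | cons r t ih =>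
    simp [ih]

lemma pvInit_desc (req : PySem.Set Char) (hnd : req.Nodup) (w : List Char) :
    pvDesc req w
      (req.foldl (fun d c => d.insert c (PySem.Chars.count w [c] : Int)) PySem.Dict.empty,
       (w.length : Int) - (req.map (fun c => (PySem.Chars.count w [c] : Int))).sum,
       req.foldl (fun acc c => if PySem.Chars.isIn [c] w then acc + 1 else acc) 0) := by
  refine ⟨?_, ?_, ?_⟩
  · intro x hx
    rw [pvGetD_fold (fun c => (PySem.Chars.count w [c] : Int)) req PySem.Dict.empty x hx,
      pvCount_single]
  · show (w.length : Int) - (req.map (fun c => (PySem.Chars.count w [c] : Int))).sum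
        = ((w.countP (fun x => decide (x ∉ req)) : Nat) : Int)
    have hm : req.map (fun c => (PySem.Chars.count w [c] : Int))
        = req.map (fun c => ((w.count c : Nat) : Int)) :=
      List.map_congr_left (fun c _ => by rw [pvCount_single])
    rw [hm, pvSumCast req (fun c => w.count c), pvSum_counts w req hnd]
    have hlen := List.length_eq_countP_add_countP (fun x => decide (x ∈ req)) (l := w)
    have hco : w.countP (fun a => decide (¬ decide (a ∈ req) = true))
        = w.countP (fun x => decide (x ∉ req)) := by
      apply List.countP_congr
      intro x _
      simp
    rw [hco] at hlen
    omega
  · show req.foldl (fun acc c => if PySem.Chars.isIn [c] w then acc + 1 else acc) 0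
        = (((req.filter (fun x => decide (x ∈ w))).length : Nat) : Int)
    rw [PySem.List.foldl_count_if (fun c => PySem.Chars.isIn [c] w) req 0]
    have hcp : req.countP (fun c => PySem.Chars.isIn [c] w)
        = (req.filter (fun x => decide (x ∈ w))).length := by
      rw [← List.countP_eq_length_filter]
      apply List.countP_congr
      intro x _
      by_cases hxw : x ∈ w
      · simp [hxw, (PySem.Chars.isIn_iff_infix [x] w).mpr ((pvInfix_single x w).mpr hxw)]
      · have hni : PySem.Chars.isIn [x] w = false := by
          rw [← Bool.not_eq_true]
          exact fun hb => hxw ((pvInfix_single x w).mp ((PySem.Chars.isIn_iff_infix [x] w).mp hb))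
        simp [hxw, hni]
    rw [hcp]
    simp

lemma pvLoop_eq (l : List Char) (req : PySem.Set Char) (K : Nat) (hnd : req.Nodup) :
    ∀ (i : Nat), i + K ≤ l.length → ∀ st, pvDesc req ((l.drop i).take K) st →
      pvOuterA l req (K : Int) (PySem.List.pyRange (i : Int) (-1) (-1))
        = pvLoopB l req K i st.1 st.2.1 st.2.2 := by
  intro i
  induction i with
  | zero =>
    intro h st hd
    obtain ⟨cnt, bad, dist⟩ := st
    rw [PySem.List.pyRange_neg_one_cons (by omega : (-1:Int) < ((0:Nat) : Int)),
      PySem.List.pyRange_neg_one_eq_nil (by omega : ((0:Nat) : Int) - 1 ≤ -1)]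
    simp only [pvOuterA, pvLoopB]
    rw [PySem.List.slice_natCast_add]
    by_cases hv : (∀ c ∈ (l.drop 0).take K, c ∈ req) ∧ ∀ c ∈ req, c ∈ (l.drop 0).take K
    · rw [if_pos ((pvAcheck_iff req _).mpr hv),
        if_pos ((pvBcheck_iff req _ (cnt, bad, dist) hd).mpr hv)]
    · rw [if_neg (fun hb => hv ((pvAcheck_iff req _).mp hb)),
        if_neg (fun hb => hv ((pvBcheck_iff req _ (cnt, bad, dist) hd).mp hb))]
  | succ i' ih =>
    intro h st hd
    obtain ⟨cnt, bad, dist⟩ := st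
    rw [PySem.List.pyRange_neg_one_cons (by omega : (-1:Int) < ((i' + 1 : Nat) : Int))]
    simp only [pvOuterA, pvLoopB]
    rw [PySem.List.slice_natCast_add]
    by_cases hv : (∀ c ∈ (l.drop (i' + 1)).take K, c ∈ req) ∧
        ∀ c ∈ req, c ∈ (l.drop (i' + 1)).take K
    · rw [if_pos ((pvAcheck_iff req _).mpr hv),
        if_pos ((pvBcheck_iff req _ (cnt, bad, dist) hd).mpr hv)]
    · rw [if_neg (fun hb => hv ((pvAcheck_iff req _).mp hb)),
        if_neg (fun hb => hv ((pvBcheck_iff req _ (cnt, bad, dist) hd).mp hb))]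
      have hi' : i' < l.length := by omega
      have hik : i' + K < l.length := by omega
      have e1 : l.getD i' 'a' = l[i']'hi' := by
        rw [List.getD_eq_getElem?_getD, List.getElem?_eq_getElem hi']
        rfl
      have e2 : l.getD (i' + K) 'a' = l[i' + K]'hik := by
        rw [List.getD_eq_getElem?_getD, List.getElem?_eq_getElem hik]
        rfl
      have d1 := pvStepAdd_desc req hnd _ (cnt, bad, dist) (l[i']'hi') hd
      have d2 := pvDesc_perm req _ _ _ (List.perm_append_singleton ..) d1
      rw [pvWin_shift l K i' (by omega)] at d2
      have d3 := pvStepDel_desc req hnd _ _ (l[i' + K]'hik) d2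
      have hcast : ((i' + 1 : Nat) : Int) - 1 = ((i' : Nat) : Int) := by push_cast; ring
      rw [hcast, e1, e2]
      exact ih (by omega) _ d3

-- ===== VERDICT (by name: the statement is the Claim_ definition above) =====
theorem find_password_spec : Claim_equal_find_password := by
  intro seq rcs ml _hdom hpre
  have hpre' : (0:Int) ≤ ml := hpre
  unfold Spec_find_password
  simp only [find_password, find_password_alt]
  by_cases hgt : ml > ((seq.toList.length : Nat) : Int)
  · rw [if_pos hgt, if_pos (Or.inl hgt)]
  · rw [if_neg hgt, if_neg (by rintro (hh | hh); exact hgt hh; omega)]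
    have hml : ml = ((ml.toNat : Nat) : Int) := (Int.toNat_of_nonneg hpre').symm
    have hle : ml ≤ (seq.toList.length : Int) := not_lt.mp hgt
    have hKle : ml.toNat ≤ seq.toList.length := by omega
    have hcast : (seq.toList.length : Int) - ml
        = ((seq.toList.length - ml.toNat : Nat) : Int) := by omega
    rw [hcast]
    rw [hml]
    have hnd := PySem.Set.nodup_ofList (xs := rcs.toList)
    have hwin : ((seq.toList.drop (seq.toList.length - ml.toNat)).take ml.toNat)
        = seq.toList.drop (seq.toList.length - ml.toNat) := by
      apply List.take_of_length_le
      rw [List.length_drop]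
      omega
    have hwl : (seq.toList.drop (seq.toList.length - ml.toNat)).length = ml.toNat := by
      rw [List.length_drop]
      omega
    have hdesc0 := pvInit_desc (PySem.Set.ofList rcs.toList) hnd
      (seq.toList.drop (seq.toList.length - ml.toNat))
    rw [hwl] at hdesc0
    exact pvLoop_eq seq.toList _ ml.toNat hnd (seq.toList.length - ml.toNat) (by omega) _
      (by rw [hwin]; exact hdesc0)
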